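-- pv_equiv track=rewrite | github.com/myexistences/ExistNuker | users.py | get_member_highest_role
-- ===== SOURCE A (Python) =====
-- def get_member_highest_role(member, all_roles):
--     """Get the highest role position of a member"""
--     member_role_ids = member.get('roles', [])
--     if not member_role_ids:
--         return 0
--
--     highest = 0
--     for role in all_roles:
--         if role.get('id') in member_role_ids:
--             pos = role.get('position', 0)
--             if pos > highest:
--                 highest = pos
--     return highest
-- ===== SOURCE B (Python) =====
-- def get_member_highest_role(member, all_roles):
--     """Get the highest role position of a member"""
--     member_role_ids = member.get('roles', [])
--     index = {}
--     for role in all_roles: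
--         rid = role.get('id')
--         if rid is None:
--             continue
--         pos = role.get('position', 0)
--         if rid in index:
--             if pos > index[rid]:
--                 index[rid] = pos
--         else:
--             index[rid] = pos
--     best = 0
--     for rid in member_role_ids:
--         p = index.get(rid)
--         if p is not None and p > best:
--             best = p
--     return best
-- ===== Notes on version B (the rewrite author's own statement) =====
-- stated objective: alternative
-- what changed: B builds an id->max-position index from all_roles once and then drives the loop over the member's role ids with dict lookups, instead of scanning all_roles and testing each role's id against the member's role-id list.
import Mathlib
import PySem

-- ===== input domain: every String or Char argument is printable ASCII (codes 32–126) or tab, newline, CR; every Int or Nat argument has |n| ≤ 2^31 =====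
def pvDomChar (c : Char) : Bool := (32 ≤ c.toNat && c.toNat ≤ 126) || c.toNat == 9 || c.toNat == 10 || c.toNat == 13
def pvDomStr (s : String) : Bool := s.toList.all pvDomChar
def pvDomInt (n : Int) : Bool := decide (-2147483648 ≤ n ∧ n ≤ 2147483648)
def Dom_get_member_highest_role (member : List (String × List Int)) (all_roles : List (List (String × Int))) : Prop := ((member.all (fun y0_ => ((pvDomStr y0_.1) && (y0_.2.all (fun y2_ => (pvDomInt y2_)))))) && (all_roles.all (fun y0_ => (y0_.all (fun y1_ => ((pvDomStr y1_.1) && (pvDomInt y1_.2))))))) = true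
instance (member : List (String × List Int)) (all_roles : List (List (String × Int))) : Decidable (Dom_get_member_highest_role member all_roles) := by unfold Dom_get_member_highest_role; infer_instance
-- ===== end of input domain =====

-- B builds an id→max-position index from all_roles and then loops over the member's role ids,
-- instead of A's scan of all_roles with a membership test against the member's role-id list.

-- ===== PORT A =====
def get_member_highest_role (member : List (String × List Int)) (all_roles : List (List (String × Int))) : Int :=
  let member_role_ids := (PySem.Dict.mk member).getD "roles" []
  if member_role_ids = [] then 0
  else
    all_roles.foldl (fun highest role =>
      match (PySem.Dict.mk role).get? "id" with
      | some rid =>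
        if rid ∈ member_role_ids then
          let pos := (PySem.Dict.mk role).getD "position" 0
          if pos > highest then pos else highest
        else highest
      | none => highest) 0

-- ===== PORT B =====
-- the first loop of Source B: build index = {id : max position}
def pvBuildIndex (all_roles : List (List (String × Int))) : PySem.Dict Int Int :=
  all_roles.foldl (fun index role =>
    match (PySem.Dict.mk role).get? "id" with
    | none => index
    | some rid =>
      let pos := (PySem.Dict.mk role).getD "position" 0
      if index.contains rid then
        if pos > index.getD rid 0 then index.insert rid pos else index
      else index.insert rid pos) PySem.Dict.empty

def get_member_highest_role_alt (member : List (String × List Int)) (all_roles : List (List (String × Int))) : Int :=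
  let member_role_ids := (PySem.Dict.mk member).getD "roles" []
  let index := pvBuildIndex all_roles
  member_role_ids.foldl (fun best rid =>
    match index.get? rid with
    | some p => if p > best then p else best
    | none => best) 0

-- ===== PRECONDITION & SPEC =====
def Spec_get_member_highest_role (member : List (String × List Int)) (all_roles : List (List (String × Int))) (out : Int) : Prop := out = get_member_highest_role_alt member all_roles
instance (member : List (String × List Int)) (all_roles : List (List (String × Int))) (out : Int) : Decidable (Spec_get_member_highest_role member all_roles out) := by unfold Spec_get_member_highest_role; infer_instance

-- ===== CLAIM (what is proved, stated in full; the proofs are below) =====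
def Claim_equal_get_member_highest_role : Prop := ∀ (member : List (String × List Int)) (all_roles : List (List (String × Int))), Dom_get_member_highest_role member all_roles → Spec_get_member_highest_role member all_roles (get_member_highest_role member all_roles)

-- ===== LEMMAS AND PROOFS =====

-- id / position of a role dict
def pvId (role : List (String × Int)) : Option Int := (PySem.Dict.mk role).get? "id"
def pvPos (role : List (String × Int)) : Int := (PySem.Dict.mk role).getD "position" 0

-- maximum of a list of Ints, none when empty
def pvMax? : List Int → Option Int
  | [] => none
  | x :: l => some (match pvMax? l with | none => x | some y => max x y)

def pvOmax (b : Int) : Option Int → Int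
  | none => b
  | some v => max b v

-- positions of roles in rs matching a given id
def pvQ (rs : List (List (String × Int))) (rid : Int) : List Int :=
  (rs.filter (fun r => pvId r = some rid)).map pvPos

-- positions of roles in rs whose id is in ids
def pvP (ids : List Int) (rs : List (List (String × Int))) : List Int :=
  (rs.filter (fun r => match pvId r with | some rid => rid ∈ ids | none => false)).map pvPos

theorem pvMax?_eq_none : ∀ (l : List Int), pvMax? l = none ↔ l = [] := by
  intro l; cases l <;> simp [pvMax?]

theorem pvMax?_isMax : ∀ (l : List Int) (v : Int), pvMax? l = some v → v ∈ l ∧ ∀ x ∈ l, x ≤ v := by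
  intro l
  induction l with
  | nil => intro v h; simp [pvMax?] at h
  | cons x t ih =>
    intro v h
    simp only [pvMax?] at h
    cases hm : pvMax? t with
    | none =>
      rw [hm] at h; simp only [Option.some.injEq] at h
      rcases (pvMax?_eq_none t).mp hm with rfl
      subst h; simp
    | some y =>
      rw [hm] at h; simp only [Option.some.injEq] at h
      obtain ⟨hy, hle⟩ := ih y hm
      subst h
      constructor
      · rcases le_total x y with h' | h'
        · exact List.mem_cons_of_mem _ (by simpa [max_eq_right h'] using hy)
        · simp [max_eq_left h']
      · intro z hz
        rcases List.mem_cons.mp hz with rfl | hz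
        · exact le_max_left _ _
        · exact le_trans (hle z hz) (le_max_right _ _)

theorem pvMax?_eq_of : ∀ (l : List Int) (v : Int), v ∈ l → (∀ x ∈ l, x ≤ v) → pvMax? l = some v := by
  intro l
  induction l with
  | nil => intro v h; simp at h
  | cons x t ih =>
    intro v hv hle
    simp only [pvMax?]
    cases hm : pvMax? t with
    | none =>
      rcases (pvMax?_eq_none t).mp hm with rfl
      simp at hv; subst hv; rfl
    | some y =>
      obtain ⟨hy, hley⟩ := pvMax?_isMax t y hm
      rcases List.mem_cons.mp hv with rfl | hv'
      · have : y ≤ v := hle y (List.mem_cons_of_mem _ hy)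
        simp [max_eq_left this]
      · have h1 : y = v := le_antisymm (hle y (List.mem_cons_of_mem _ hy)) (hley v hv')
        subst h1
        have : x ≤ y := hle x (List.mem_cons_self)
        simp [max_eq_right this]


theorem pvOmax_cons (b p : Int) (L : List Int) :
    pvOmax (max b p) (pvMax? L) = pvOmax b (pvMax? (p :: L)) := by
  cases hm : pvMax? L with
  | none => simp [pvOmax, pvMax?, hm]
  | some y => simp [pvOmax, pvMax?, hm, max_assoc]

-- A's fold computes pvOmax b (pvMax? (pvP ids rs))
theorem pvA_char (ids : List Int) : ∀ (rs : List (List (String × Int))) (b : Int),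
    rs.foldl (fun highest role =>
      match (PySem.Dict.mk role).get? "id" with
      | some rid =>
        if rid ∈ ids then
          let pos := (PySem.Dict.mk role).getD "position" 0
          if pos > highest then pos else highest
        else highest
      | none => highest) b = pvOmax b (pvMax? (pvP ids rs)) := by
  intro rs
  induction rs with
  | nil => intro b; simp [pvP, pvOmax, pvMax?]
  | cons r t ih =>
    intro b
    simp only [List.foldl_cons]
    cases hid : (PySem.Dict.mk r).get? "id" with
    | none =>
      rw [ih b]
      have : pvP ids (r :: t) = pvP ids t := by
        simp [pvP, pvId, hid]
      rw [this]
    | some rid =>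
      by_cases hmem : rid ∈ ids
      · simp only [hmem, if_pos]
        have hP : pvP ids (r :: t) = pvPos r :: pvP ids t := by
          simp [pvP, pvId, hid, hmem, pvPos]
        rw [hP]
        have hstep : (if (PySem.Dict.mk r).getD "position" 0 > b then (PySem.Dict.mk r).getD "position" 0 else b) = max b (pvPos r) := by
          simp [pvPos, max_def]; omega
        rw [hstep, ih, pvOmax_cons]
      · simp only [hmem, if_false]
        rw [ih b]
        have : pvP ids (r :: t) = pvP ids t := by
          simp [pvP, pvId, hid, hmem]
        rw [this]

-- index lookup = max over matching positions
def pvOcomb : Option Int → Option Int → Option Int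
  | o, none => o
  | none, some v => some v
  | some u, some v => some (max u v)

theorem pvQ_cons (r : List (String × Int)) (t : List (List (String × Int))) (rid : Int) :
    pvQ (r :: t) rid = if pvId r = some rid then pvPos r :: pvQ t rid else pvQ t rid := by
  by_cases h : pvId r = some rid <;> simp [pvQ, h]

theorem pvIndex_get_aux (rid : Int) : ∀ (rs : List (List (String × Int))) (d : PySem.Dict Int Int),
    (rs.foldl (fun index role =>
      match (PySem.Dict.mk role).get? "id" with
      | none => index
      | some rid =>
        let pos := (PySem.Dict.mk role).getD "position" 0
        if index.contains rid then
          if pos > index.getD rid 0 then index.insert rid pos else index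
        else index.insert rid pos) d).get? rid
    = pvOcomb (d.get? rid) (pvMax? (pvQ rs rid)) := by
  intro rs
  induction rs with
  | nil =>
    intro d
    simp [pvQ, pvMax?]
    cases d.get? rid <;> rfl
  | cons r t ih =>
    intro d
    simp only [List.foldl_cons]
    rw [ih]
    rw [pvQ_cons]
    cases hid : (PySem.Dict.mk r).get? "id" with
    | none =>
      have : pvId r = some rid ↔ False := by simp [pvId, hid]
      simp [this]
    | some rid' =>
      by_cases heq : rid' = rid
      · subst heq
        have hcond : pvId r = some rid' := by simp [pvId, hid]
        simp only [hcond, if_pos]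
        cases hd : d.get? rid' with
        | none =>
          have hc : d.contains rid' = false := by
            rw [PySem.Dict.contains_eq_isSome_get?, hd]; rfl
          simp only [hc, Bool.false_eq_true, if_false]
          rw [PySem.Dict.get?_insert_self]
          cases hm : pvMax? (pvQ t rid') <;>
            simp [pvOcomb, pvMax?, hm, pvPos]
        | some u =>
          have hc : d.contains rid' = true := by
            rw [PySem.Dict.contains_eq_isSome_get?, hd]; rfl
          have hgd : d.getD rid' 0 = u := by rw [PySem.Dict.getD_eq_get?_getD, hd]; rfl
          simp only [hc, if_true, hgd]
          by_cases hgt : (PySem.Dict.mk r).getD "position" 0 > u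
          · simp only [hgt, if_true, PySem.Dict.get?_insert_self]
            cases hm : pvMax? (pvQ t rid') <;>
              simp only [pvOcomb, pvMax?, hm, pvPos, Option.some.injEq] <;>
              simp [max_def] <;> (try split_ifs) <;> omega
          · simp only [hgt, if_false, hd]
            cases hm : pvMax? (pvQ t rid') <;>
              simp only [pvOcomb, pvMax?, hm, pvPos, Option.some.injEq] <;>
              simp [max_def] <;> (try split_ifs) <;> omega
      · have hcond : ¬ (pvId r = some rid) := by simp [pvId, hid]; omega
        simp only [hcond, if_false]
        have hstep : (if d.contains rid' = true then
              if (PySem.Dict.mk r).getD "position" 0 > d.getD rid' 0 then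
                d.insert rid' ((PySem.Dict.mk r).getD "position" 0)
              else d
            else d.insert rid' ((PySem.Dict.mk r).getD "position" 0)).get? rid = d.get? rid := by
          split_ifs <;> first
            | rfl
            | (rw [PySem.Dict.get?_insert_of_ne] ; omega)
        rw [hstep]

theorem pvIndex_get (rs : List (List (String × Int))) (rid : Int) :
    (pvBuildIndex rs).get? rid = pvMax? (pvQ rs rid) := by
  rw [pvBuildIndex, pvIndex_get_aux]
  cases pvMax? (pvQ rs rid) <;> rfl

-- B's second fold
theorem pvB_char (g : Int → Option Int) : ∀ (ids : List Int) (b : Int),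
    ids.foldl (fun best rid =>
      match g rid with
      | some p => if p > best then p else best
      | none => best) b = pvOmax b (pvMax? (ids.filterMap g)) := by
  intro ids
  induction ids with
  | nil => intro b; simp [pvOmax, pvMax?]
  | cons rid t ih =>
    intro b
    simp only [List.foldl_cons, List.filterMap_cons]
    cases hg : g rid with
    | none => rw [ih b]
    | some p =>
      show List.foldl _ (if p > b then p else b) t = _
      have hstep : (if p > b then p else b) = max b p := by simp [max_def]; omega
      rw [hstep, ih, pvOmax_cons]

-- the exchange: max over ids of per-id maxima = max over all matching positions
theorem pvExchange (ids : List Int) (rs : List (List (String × Int))) :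
    pvMax? (ids.filterMap (fun rid => pvMax? (pvQ rs rid))) = pvMax? (pvP ids rs) := by
  have memQ : ∀ (rid x : Int), x ∈ pvQ rs rid ↔ ∃ r ∈ rs, pvId r = some rid ∧ x = pvPos r := by
    intro rid x
    simp [pvQ, List.mem_filter]
    tauto
  have memP : ∀ (x : Int), x ∈ pvP ids rs ↔ ∃ rid ∈ ids, x ∈ pvQ rs rid := by
    intro x
    simp only [pvP, List.mem_map, List.mem_filter]
    constructor
    · rintro ⟨r, ⟨hr, hcond⟩, rfl⟩
      cases hid : pvId r with
      | none => rw [hid] at hcond; simp at hcond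
      | some rid =>
        rw [hid] at hcond; simp at hcond
        exact ⟨rid, hcond, (memQ rid _).mpr ⟨r, hr, hid, rfl⟩⟩
    · rintro ⟨rid, hrid, hx⟩
      obtain ⟨r, hr, hid, rfl⟩ := (memQ rid _).mp hx
      exact ⟨r, ⟨hr, by simp [hid, hrid]⟩, rfl⟩
  cases hR : pvMax? (pvP ids rs) with
  | none =>
    have hPnil : pvP ids rs = [] := (pvMax?_eq_none _).mp hR
    rw [pvMax?_eq_none]
    rw [List.filterMap_eq_nil_iff]
    intro rid hrid
    rw [pvMax?_eq_none]
    cases hq : pvQ rs rid with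
    | nil => rfl
    | cons y ys =>
      exfalso
      have : y ∈ pvP ids rs := (memP y).mpr ⟨rid, hrid, by rw [hq]; simp⟩
      rw [hPnil] at this; simp at this
  | some v =>
    obtain ⟨hvmem, hvle⟩ := pvMax?_isMax _ v hR
    obtain ⟨rid0, hrid0, hvQ⟩ := (memP v).mp hvmem
    -- the per-id maximum at rid0 is v itself
    have hQmax : pvMax? (pvQ rs rid0) = some v := by
      apply pvMax?_eq_of _ _ hvQ
      intro x hx
      exact hvle x ((memP x).mpr ⟨rid0, hrid0, hx⟩)
    apply pvMax?_eq_of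
    · exact List.mem_filterMap.mpr ⟨rid0, hrid0, hQmax⟩
    · intro y hy
      obtain ⟨rid, hrid, hQy⟩ := List.mem_filterMap.mp hy
      obtain ⟨hymem, _⟩ := pvMax?_isMax _ y hQy
      exact hvle y ((memP y).mpr ⟨rid, hrid, hymem⟩)

-- ===== VERDICT (by name: the statement is the Claim_ definition above) =====
theorem get_member_highest_role_spec : Claim_equal_get_member_highest_role := by
  intro member all_roles _
  unfold Spec_get_member_highest_role
  unfold get_member_highest_role get_member_highest_role_alt
  simp only []
  by_cases hids : (PySem.Dict.mk member).getD "roles" ([] : List Int) = []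
  · rw [hids]
    simp
  · rw [if_neg hids]
    rw [pvA_char, pvB_char ((pvBuildIndex all_roles).get?)]
    have : ((PySem.Dict.mk member).getD "roles" ([] : List Int)).filterMap
        ((pvBuildIndex all_roles).get?)
      = ((PySem.Dict.mk member).getD "roles" ([] : List Int)).filterMap
        (fun rid => pvMax? (pvQ all_roles rid)) := by
      apply List.filterMap_congr
      intro rid _
      exact pvIndex_get all_roles rid
    rw [this, pvExchange]
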